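-- pv_equiv track=rewrite | github.com/muneebaifrah/Unstop-100-Days-Coding-Sprint | Day-34/1.Maximum_Score_of_String.py | calculate_max_score
-- ===== SOURCE A (Python) =====
-- def calculate_max_score(n, s):
--     MOD = 10**9 + 7
--
--     # Convert characters to values (a=1, b=2, ..., z=26)
--     values = [ord(c) - 96 for c in s]
--
--     # To maximize score, place smallest values at smallest powers
--     values.sort()
--
--     power = 1  # 26^0
--     result = 0
--
--     for v in values:
--         result = (result + v * power) % MOD
--         power = (power * 26) % MOD
--
--     return result
-- ===== SOURCE B (Python) =====
-- def calculate_max_score(n, s):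
--     MOD = 10**9 + 7
--     # Counting sort over the 128 ASCII codes instead of a comparison sort.
--     counts = [0] * 128
--     for c in s:
--         counts[ord(c)] += 1
--     result = 0
--     power = 1
--     for code in range(128):
--         v = code - 96
--         for _ in range(counts[code]):
--             result = (result + v * power) % MOD
--             power = (power * 26) % MOD
--     return result
-- ===== Notes on version B (the rewrite author's own statement) =====
-- stated objective: alternative
-- what changed: Replaces A's comparison sort of the character values by a counting sort over the 128 ASCII codes: count each code in one pass, then run the weighted-sum loop bucket by bucket in ascending code order (sorting becomes O(n), but the per-element mod loop both share dominates, so no measured speed-up).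
import Mathlib
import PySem

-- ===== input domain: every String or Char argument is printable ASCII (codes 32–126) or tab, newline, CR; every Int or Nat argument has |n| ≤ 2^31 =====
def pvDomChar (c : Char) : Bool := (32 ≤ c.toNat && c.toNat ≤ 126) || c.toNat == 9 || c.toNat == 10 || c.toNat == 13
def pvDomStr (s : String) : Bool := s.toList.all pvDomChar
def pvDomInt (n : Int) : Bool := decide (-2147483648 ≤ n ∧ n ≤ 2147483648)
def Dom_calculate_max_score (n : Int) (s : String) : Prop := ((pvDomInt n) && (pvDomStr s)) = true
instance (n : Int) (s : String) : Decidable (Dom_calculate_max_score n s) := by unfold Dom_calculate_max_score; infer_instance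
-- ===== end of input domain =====

-- B replaces A's comparison sort of the character values by a counting sort over the 128 ASCII codes (alternative algorithm; the shared mod loop dominates, so it is not measurably faster).


-- ===== PORT A =====
def pvMOD : Int := 1000000007

-- loop body shared by both Pythons: result = (result + v*power) % MOD; power = (power*26) % MOD
def pvStep (rp : Int × Int) (v : Int) : Int × Int :=
  (PySem.Int.mod (rp.1 + v * rp.2) pvMOD, PySem.Int.mod (rp.2 * 26) pvMOD)

def calculate_max_score (n : Int) (s : String) : Int :=
  let values : List Int := s.toList.map (fun c => (c.toNat : Int) - 96)
  let values' := PySem.List.sorted values (fun x => x) false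
  (values'.foldl pvStep (0, 1)).1

-- ===== PORT B =====
-- counts[ord(c)] += 1 over the string
def pvCounts (cs : List Char) : List Nat :=
  cs.foldl (fun a c => a.set c.toNat (a[c.toNat]! + 1)) (List.replicate 128 0)

def calculate_max_score_alt (n : Int) (s : String) : Int :=
  let counts := pvCounts s.toList
  ((List.range 128).foldl (fun (rp : Int × Int) (code : Nat) =>
      (List.range counts[code]!).foldl (fun rp _ => pvStep rp ((code : Int) - 96)) rp)
    (0, 1)).1

-- ===== PRECONDITION & SPEC =====
def Spec_calculate_max_score (n : Int) (s : String) (out : Int) : Prop := out = calculate_max_score_alt n s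
instance (n : Int) (s : String) (out : Int) : Decidable (Spec_calculate_max_score n s out) := by unfold Spec_calculate_max_score; infer_instance

-- ===== CLAIM (what is proved, stated in full; the proofs are below) =====
def Claim_equal_calculate_max_score : Prop := ∀ (n : Int) (s : String), Dom_calculate_max_score n s → Spec_calculate_max_score n s (calculate_max_score n s)

-- ===== LEMMAS AND PROOFS =====

-- the list of values the counting sort effectively emits
def pvVlist (cnt : Nat → Nat) : List Int :=
  (List.range 128).flatMap (fun code => List.replicate (cnt code) ((code : Int) - 96))

theorem pv_fold_range_eq_replicate (k : Nat) (v : Int) (rp : Int × Int) :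
    (List.range k).foldl (fun rp _ => pvStep rp v) rp = (List.replicate k v).foldl pvStep rp := by
  induction k generalizing rp with
  | zero => rfl
  | succ m ih =>
      rw [List.range_succ, List.replicate_succ', List.foldl_append, List.foldl_append, ih]
      rfl

theorem pv_fold_flatMap (codes : List Nat) (g : Nat → List Int) (init : Int × Int) :
    (codes.flatMap g).foldl pvStep init
      = codes.foldl (fun rp code => (g code).foldl pvStep rp) init := by
  induction codes generalizing init with
  | nil => rfl
  | cons c rest ih => simp [List.flatMap_cons, List.foldl_append, ih]

theorem pv_counts_spec (cs : List Char) (hcs : ∀ c ∈ cs, c.toNat < 128)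
    (a : List Nat) (ha : a.length = 128) (code : Nat) (hcode : code < 128) :
    (cs.foldl (fun a c => a.set c.toNat (a[c.toNat]! + 1)) a)[code]!
      = a[code]! + cs.countP (fun c => c.toNat == code) := by
  induction cs generalizing a with
  | nil => simp
  | cons c rest ih =>
      have hc : c.toNat < 128 := hcs c (by simp)
      have hrest : ∀ x ∈ rest, x.toNat < 128 := fun x hx => hcs x (by simp [hx])
      have hlen : (a.set c.toNat (a[c.toNat]! + 1)).length = 128 := by simp [ha]
      rw [List.foldl_cons, ih hrest _ hlen, List.countP_cons]
      have hget : (a.set c.toNat (a[c.toNat]! + 1))[code]!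
          = if c.toNat = code then a[code]! + 1 else a[code]! := by
        have h1 : code < a.length := by omega
        have h2 : code < (a.set c.toNat (a[c.toNat]! + 1)).length := by simp [ha]; omega
        rw [getElem!_pos (a.set c.toNat (a[c.toNat]! + 1)) code h2, getElem!_pos a code h1, List.getElem_set]
        split
        · simp_all [getElem!_pos]
        · simp_all [getElem!_pos]
      rw [hget]
      by_cases h : c.toNat = code <;> simp [h] <;> omega

-- count of a value in the emitted list when no code produces it
theorem pv_count_flatMap_zero (cnt : Nat → Nat) (codes : List Nat) (v : Int)
    (h : ∀ code ∈ codes, ((code : Int) - 96) ≠ v) :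
    (codes.flatMap (fun code => List.replicate (cnt code) ((code : Int) - 96))).count v = 0 := by
  induction codes with
  | nil => rfl
  | cons c rest ih =>
      rw [List.flatMap_cons, List.count_append, List.count_replicate]
      have hc := h c (by simp)
      rw [if_neg (by simpa using hc), ih (fun x hx => h x (by simp [hx]))]

theorem pv_count_flatMap_mem (cnt : Nat → Nat) (codes : List Nat) (j : Nat)
    (hnd : codes.Nodup) (hj : j ∈ codes) :
    (codes.flatMap (fun code => List.replicate (cnt code) ((code : Int) - 96))).count ((j : Int) - 96)
      = cnt j := by
  induction codes with
  | nil => simp at hj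
  | cons c rest ih =>
      rw [List.flatMap_cons, List.count_append, List.count_replicate]
      rcases List.mem_cons.mp hj with h | h
      · subst h
        rw [if_pos (by simp), pv_count_flatMap_zero]
        · omega
        · intro code hcode he
          have hcj : code = j := by
            have : (code : Int) = (j : Int) := by omega
            exact_mod_cast this
          subst hcj
          exact (List.nodup_cons.mp hnd).1 hcode
      · have hne : c ≠ j := by
          intro he; subst he; exact (List.nodup_cons.mp hnd).1 h
        have hne' : ¬ ((c : Int) - 96 == (j : Int) - 96) = true := by
          simp only [beq_iff_eq]
          intro he
          exact hne (by exact_mod_cast (by omega : (c : Int) = (j : Int)))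
        rw [if_neg hne', ih (List.nodup_cons.mp hnd).2 h]
        omega

theorem pv_pairwise_flatMap (cnt : Nat → Nat) (codes : List Nat)
    (h : codes.Pairwise (· < ·)) :
    (codes.flatMap (fun code => List.replicate (cnt code) ((code : Int) - 96))).Pairwise (· ≤ ·) := by
  induction codes with
  | nil => exact List.Pairwise.nil
  | cons c rest ih =>
      rw [List.flatMap_cons]
      rcases List.pairwise_cons.mp h with ⟨hcr, hrest⟩
      refine List.pairwise_append.mpr ⟨?_, ih hrest, ?_⟩
      · exact List.pairwise_replicate.mpr (Or.inr le_rfl)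
      · intro x hx y hy
        have hxv := List.eq_of_mem_replicate hx
        rcases List.mem_flatMap.mp hy with ⟨code, hcode, hy'⟩
        have hyv := List.eq_of_mem_replicate hy'
        subst hxv; subst hyv
        have := hcr code hcode
        omega

theorem pv_vlist_perm (cs : List Char) (hcs : ∀ c ∈ cs, c.toNat < 128) :
    (pvVlist (fun code => (pvCounts cs)[code]!)).Perm (cs.map (fun c => (c.toNat : Int) - 96)) := by
  unfold pvVlist
  rw [List.perm_iff_count]
  intro v
  by_cases hv : ∃ j : Nat, j < 128 ∧ v = (j : Int) - 96
  · rcases hv with ⟨j, hj, rfl⟩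
    rw [pv_count_flatMap_mem _ _ j (List.nodup_range) (List.mem_range.mpr hj)]
    have := pv_counts_spec cs hcs (List.replicate 128 0) (by simp) j hj
    unfold pvCounts
    rw [this]
    have hz : (List.replicate 128 (0:Nat))[j]! = 0 := by
      rw [getElem!_pos (List.replicate 128 (0:Nat)) j (by simpa using hj)]
      exact List.getElem_replicate _
    rw [hz, Nat.zero_add, List.count_eq_countP, List.countP_map]
    apply List.countP_congr
    intro c hc
    have hcl := hcs c hc
    simp only [Function.comp_apply, beq_iff_eq]
    omega
  · rw [pv_count_flatMap_zero]
    · symm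
      rw [List.count_eq_countP, List.countP_map, List.countP_eq_zero]
      intro c hc
      have hcl := hcs c hc
      simp only [Function.comp_apply, beq_iff_eq]
      intro h
      exact hv ⟨c.toNat, hcl, h.symm⟩
    · intro code hcode h
      exact hv ⟨code, List.mem_range.mp hcode, h.symm⟩

theorem pv_dom_chars (n : Int) (s : String) (hd : Dom_calculate_max_score n s) :
    ∀ c ∈ s.toList, c.toNat < 128 := by
  intro c hc
  unfold Dom_calculate_max_score at hd
  rw [Bool.and_eq_true] at hd
  have := List.all_eq_true.mp hd.2 c hc
  unfold pvDomChar at this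
  simp only [Bool.or_eq_true, Bool.and_eq_true, decide_eq_true_eq, beq_iff_eq] at this
  omega

-- ===== VERDICT (by name: the statement is the Claim_ definition above) =====
theorem calculate_max_score_spec : Claim_equal_calculate_max_score := by
  intro n s hd
  unfold Spec_calculate_max_score calculate_max_score calculate_max_score_alt
  dsimp only
  have hcs := pv_dom_chars n s hd
  set cnt : Nat → Nat := fun code => (pvCounts s.toList)[code]! with hcnt
  have hperm := pv_vlist_perm s.toList hcs
  have hpw := pv_pairwise_flatMap cnt (List.range 128) List.pairwise_lt_range
  have hsorted : PySem.List.sorted (s.toList.map (fun c => (c.toNat : Int) - 96)) (fun x => x) false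
      = pvVlist cnt := by
    unfold pvVlist at hpw ⊢
    exact PySem.List.sorted_id_eq_of_perm_of_pairwise _ _ hperm hpw
  rw [hsorted]
  unfold pvVlist
  rw [pv_fold_flatMap]
  congr 1
  apply List.foldl_ext
  intro rp code hcode
  exact (pv_fold_range_eq_replicate (cnt code) _ rp).symm
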